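-- pv_equiv track=rewrite | github.com/kkkskty/Agents | backend/app/core/llm_provider.py | _repair_unbalanced_braces
-- ===== SOURCE A (Python) =====
-- def _repair_unbalanced_braces(s: str) -> str:
--     """部分模型会漏写最外层 `}`（如 intent 只输出到 ...}] ），导致 json.loads 失败。"""
--     t = s.strip()
--     if not t.startswith("{"):
--         return s
--     out = t
--     guard = 0
--     while out.count("{") > out.count("}") and guard < 8:
--         out += "}"
--         guard += 1
--     return out
-- ===== SOURCE B (Python) =====
-- def _repair_unbalanced_braces(s: str) -> str:
--     t = s.strip()
--     if not t.startswith("{"):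
--         return s
--     n = t.count("{") - t.count("}")
--     return t + "}" * max(0, min(n, 8))
-- ===== Notes on version B (the rewrite author's own statement) =====
-- stated objective: simpler
-- what changed: Replaces the while-loop that appends one brace at a time and recounts the whole string each iteration with a single closed-form deficit count clamped to [0,8] and one string multiply.
import Mathlib
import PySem

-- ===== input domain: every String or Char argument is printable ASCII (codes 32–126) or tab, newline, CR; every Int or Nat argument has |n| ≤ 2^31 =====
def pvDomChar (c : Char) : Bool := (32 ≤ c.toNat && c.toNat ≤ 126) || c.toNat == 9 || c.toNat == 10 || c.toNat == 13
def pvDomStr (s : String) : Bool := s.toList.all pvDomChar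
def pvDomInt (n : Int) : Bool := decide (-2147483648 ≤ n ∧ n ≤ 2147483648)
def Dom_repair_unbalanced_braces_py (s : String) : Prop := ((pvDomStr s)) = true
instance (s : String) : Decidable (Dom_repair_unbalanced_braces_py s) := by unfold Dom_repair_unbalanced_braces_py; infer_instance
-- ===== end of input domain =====

-- B replaces A's append-one-brace-and-recount while-loop by a single clamped deficit count and string multiply (simpler, same result).


-- ===== PORT A =====
-- the while-loop: `while out.count("{") > out.count("}") and guard < 8: out += "}"; guard += 1`
def repairLoopA (out : String) (guard : Int) : String :=
  if PySem.Str.count out "{" > PySem.Str.count out "}" ∧ guard < 8 then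
    repairLoopA (out ++ "}") (guard + 1)
  else out
termination_by (8 - guard).toNat
decreasing_by omega

def repair_unbalanced_braces_py (s : String) : String :=
  let t := PySem.Str.strip s
  if ¬ PySem.Str.startswith t "{" then s
  else repairLoopA t 0

-- ===== PORT B =====
def repair_unbalanced_braces_py_alt (s : String) : String :=
  let t := PySem.Str.strip s
  if ¬ PySem.Str.startswith t "{" then s
  else
    let n : Int := (PySem.Str.count t "{" : Int) - (PySem.Str.count t "}" : Int)
    t ++ String.ofList (List.replicate (max 0 (min n 8)).toNat '}')

-- ===== PRECONDITION & SPEC =====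
def Spec_repair_unbalanced_braces_py (s : String) (out : String) : Prop := out = repair_unbalanced_braces_py_alt s
instance (s : String) (out : String) : Decidable (Spec_repair_unbalanced_braces_py s out) := by unfold Spec_repair_unbalanced_braces_py; infer_instance

-- ===== CLAIM (what is proved, stated in full; the proofs are below) =====
def Claim_equal_repair_unbalanced_braces_py : Prop := ∀ (s : String), Dom_repair_unbalanced_braces_py s → Spec_repair_unbalanced_braces_py s (repair_unbalanced_braces_py s)

-- ===== LEMMAS AND PROOFS =====

-- Python's str.count with a single-character needle is the character count.
lemma count_go_single (c : Char) : ∀ (l : List Char) (fuel acc : Nat), l.length ≤ fuel →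
    PySem.Chars.count.go [c] fuel l acc = acc + l.count c := by
  intro l
  induction l with
  | nil => intro fuel acc h; cases fuel <;> simp [PySem.Chars.count.go]
  | cons hd tl ih =>
    intro fuel acc h
    cases fuel with
    | zero => simp at h
    | succ f =>
      rw [PySem.Chars.count.go]
      simp only [List.length_cons] at h
      by_cases hc : c = hd
      · subst hc
        rw [if_pos (by simp [List.isPrefixOf])]
        simp only [List.length_singleton, List.drop_succ_cons, List.drop_zero]
        rw [ih f (acc + 1) (by omega)]
        simp
        omega
      · rw [if_neg (by simp [List.isPrefixOf, hc])]
        rw [ih f acc (by omega)]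
        simp [List.count_cons]
        intro h'; exact absurd h'.symm hc

lemma count_single (c : Char) (l : List Char) : PySem.Chars.count l [c] = l.count c := by
  rw [PySem.Chars.count, if_neg (by simp)]
  rw [count_go_single c l l.length 0 le_rfl]
  omega

lemma str_count_open (s : String) : PySem.Str.count s "{" = s.toList.count '{' := by
  rw [PySem.Str.count_eq, show ("{" : String).toList = ['{'] by rfl, count_single]

lemma str_count_close (s : String) : PySem.Str.count s "}" = s.toList.count '}' := by
  rw [PySem.Str.count_eq, show ("}" : String).toList = ['}'] by rfl, count_single]

lemma toList_append_close (s : String) : (s ++ "}").toList = s.toList ++ ['}'] := by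
  simp [show ("}" : String).toList = ['}'] from rfl]

-- repairLoopA run with guard = 8 - k appends exactly the clamped brace deficit.
lemma loop_eq : ∀ (k : Nat), k ≤ 8 → ∀ (out : String),
    repairLoopA out (8 - (k : Int)) =
      out ++ String.ofList (List.replicate
        (min ((PySem.Str.count out "{" : Int) - (PySem.Str.count out "}" : Int)) (k : Int)).toNat '}') := by
  intro k
  induction k with
  | zero =>
    intro _ out
    rw [repairLoopA, if_neg (by omega)]
    have h0 : (min ((PySem.Str.count out "{" : Int) - (PySem.Str.count out "}" : Int)) ((0 : Nat) : Int)).toNat = 0 := by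
      omega
    rw [h0]
    apply String.toList_inj.mp
    simp
  | succ k ih =>
    intro hk out
    rw [repairLoopA]
    by_cases hc : PySem.Str.count out "{" > PySem.Str.count out "}"
    · rw [if_pos ⟨hc, by push_cast; omega⟩]
      have h1 : (8 : Int) - ((k + 1 : Nat) : Int) + 1 = 8 - (k : Int) := by push_cast; omega
      rw [h1, ih (by omega) (out ++ "}")]
      have hopen : PySem.Str.count (out ++ "}") "{" = PySem.Str.count out "{" := by
        rw [str_count_open, str_count_open, toList_append_close]
        simp [List.count_append]
      have hclose : PySem.Str.count (out ++ "}") "}" = PySem.Str.count out "}" + 1 := by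
        rw [str_count_close, str_count_close, toList_append_close]
        simp [List.count_append]
      rw [hopen, hclose]
      have hmin : (min ((PySem.Str.count out "{" : Int) - (((PySem.Str.count out "}" : Nat) + 1 : Nat) : Int)) (k : Int)).toNat + 1
          = (min ((PySem.Str.count out "{" : Int) - (PySem.Str.count out "}" : Int)) ((k + 1 : Nat) : Int)).toNat := by
        push_cast
        omega
      rw [← hmin]
      apply String.toList_inj.mp
      simp [List.replicate_succ]
    · rw [if_neg (by tauto)]
      have h0 : (min ((PySem.Str.count out "{" : Int) - (PySem.Str.count out "}" : Int)) ((k + 1 : Nat) : Int)).toNat = 0 := by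
        omega
      rw [h0]
      apply String.toList_inj.mp
      simp

-- ===== VERDICT (by name: the statement is the Claim_ definition above) =====
theorem repair_unbalanced_braces_py_spec : Claim_equal_repair_unbalanced_braces_py := by
  unfold Claim_equal_repair_unbalanced_braces_py
  intro s _
  unfold Spec_repair_unbalanced_braces_py repair_unbalanced_braces_py repair_unbalanced_braces_py_alt
  by_cases h : PySem.Str.startswith (PySem.Str.strip s) "{" = true
  · simp only [h, not_true_eq_false, if_false]
    have hl := loop_eq 8 le_rfl (PySem.Str.strip s)
    have hg : (8 : Int) - ((8 : Nat) : Int) = 0 := by norm_num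
    rw [hg] at hl
    rw [hl]
    have hn : (min ((PySem.Str.count (PySem.Str.strip s) "{" : Int) - (PySem.Str.count (PySem.Str.strip s) "}" : Int)) ((8 : Nat) : Int)).toNat
        = (max 0 (min ((PySem.Str.count (PySem.Str.strip s) "{" : Int) - (PySem.Str.count (PySem.Str.strip s) "}" : Int)) 8)).toNat := by
      push_cast
      omega
    rw [hn]
  · simp only [h]
    simp
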